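-- pv_equiv track=rewrite | github.com/work-acc/Praktika11 | Individual1.py | function
-- ===== SOURCE A (Python) =====
-- def function(s):
--     if len(s) == 1:
--         return [s]
--
--     perm_list = []
--     for a in s:
--         elements = [x for x in s if x != a]
--         z = function(elements)
--
--         for t in z:
--             perm_list.append([a] + t)
--
--     return perm_list
-- ===== SOURCE B (Python) =====
-- def function(s):
--     # Iterative DFS with an explicit stack instead of A's recursion (same output value).
--     out = []
--     stack = [([], list(s))]
--     while stack:
--         prefix, rem = stack.pop()
--         if len(rem) == 1:
--             out.append(prefix + rem)
--         else:
--             stack.extend((prefix + [a], [x for x in rem if x != a])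
--                          for a in reversed(rem))
--     return out
-- ===== Notes on version B (the rewrite author's own statement) =====
-- stated objective: alternative
-- what changed: Replaces A's recursion with an iterative depth-first traversal over an explicit worklist of (prefix, remaining) pairs, emitting a permutation whenever one element remains.
import Mathlib
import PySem

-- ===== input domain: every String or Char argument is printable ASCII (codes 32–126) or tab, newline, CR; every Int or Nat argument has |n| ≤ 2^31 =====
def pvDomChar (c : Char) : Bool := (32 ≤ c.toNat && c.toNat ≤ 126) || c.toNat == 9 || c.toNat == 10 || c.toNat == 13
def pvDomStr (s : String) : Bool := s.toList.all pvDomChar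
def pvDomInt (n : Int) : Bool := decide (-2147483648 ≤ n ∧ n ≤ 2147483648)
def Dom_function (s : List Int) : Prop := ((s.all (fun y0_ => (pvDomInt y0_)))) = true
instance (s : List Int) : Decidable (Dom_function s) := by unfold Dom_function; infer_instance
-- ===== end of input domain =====

-- B replaces A's recursion by an iterative depth-first worklist of (prefix, remaining) pairs;
-- same return value (return-value equivalence only; neither program mutates its argument).

-- ===== PORT A =====
-- termination helper: removing a present element by value shortens the list
theorem pvFilterNeLt (s : List Int) (a : Int) (h : a ∈ s) :
    (s.filter (fun x => x != a)).length < s.length := by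
  induction s with
  | nil => cases h
  | cons b t ih =>
    rcases List.mem_cons.mp h with rfl | hb
    · simp only [List.filter_cons, bne_self_eq_false, List.length_cons]
      exact Nat.lt_succ_of_le (List.length_filter_le _ _)
    · simp only [List.filter_cons, List.length_cons]
      by_cases hba : (b != a) = true
      · simp only [hba]
        exact Nat.succ_lt_succ (ih hb)
      · simp only [Bool.not_eq_true] at hba
        simp only [hba]
        exact Nat.lt_succ_of_lt (ih hb)

theorem pvMapAttach {α β : Type} (l : List α) (F : α → β) :
    l.attach.map (fun x => F x.1) = l.map F := by
  conv_rhs => rw [← List.attach_map_subtype_val l, List.map_map]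
  simp [Function.comp_def]

def function (s : List Int) : List (List Int) :=
  if s.length = 1 then [s]
  else
    s.attach.foldl
      (fun perm_list a =>
        let elements := s.filter (fun x => x != a.1)
        let z := function elements
        z.foldl (fun pl t => pl ++ [a.1 :: t]) perm_list)
      []
termination_by s.length
decreasing_by
  simpa using pvFilterNeLt s a.1 a.2

-- ===== PORT B =====
-- termination helper for the worklist loop: a popped pair of measure (|rem|+1)! is replaced
-- by |rem| children of measure ≤ |rem|! each, and |rem|·|rem|! < (|rem|+1)!.
theorem pvChildrenSumLt (rem : List Int) :
    ((rem.map (fun a => ((rem.filter (fun x => x != a)).length + 1).factorial)).sum)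
      < (rem.length + 1).factorial := by
  have hb : ∀ y ∈ rem.map (fun a => ((rem.filter (fun x => x != a)).length + 1).factorial),
      y ≤ rem.length.factorial := by
    intro y hy
    rcases List.mem_map.mp hy with ⟨a, ha, rfl⟩
    exact Nat.factorial_le (pvFilterNeLt rem a ha)
  have hsum := List.sum_le_card_nsmul _ _ hb
  simp only [List.length_map, smul_eq_mul] at hsum
  calc ((rem.map (fun a => ((rem.filter (fun x => x != a)).length + 1).factorial)).sum)
      ≤ rem.length * rem.length.factorial := hsum
    _ < (rem.length + 1) * rem.length.factorial :=
        (Nat.mul_lt_mul_right rem.length.factorial_pos).mpr (Nat.lt_succ_self _)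
    _ = (rem.length + 1).factorial := (Nat.factorial_succ _).symm

-- In this port the head of the Lean list is the top of the Python stack, so
-- `for a in reversed(rem): stack.append(...)` becomes prepending the children in forward order.
def functionAltLoop (out : List (List Int)) (stack : List (List Int × List Int)) :
    List (List Int) :=
  match stack with
  | [] => out
  | (pre, rem) :: rest =>
    if rem.length = 1 then functionAltLoop (out ++ [pre ++ rem]) rest
    else functionAltLoop out
      ((rem.map (fun a => (pre ++ [a], rem.filter (fun x => x != a)))) ++ rest)
termination_by (stack.map (fun e => (e.2.length + 1).factorial)).sum
decreasing_by
  · simp only [List.map_cons, List.sum_cons]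
    have : 0 < (rem.length + 1).factorial := Nat.factorial_pos _
    omega
  · have h := pvChildrenSumLt rem
    simp only [List.map_cons, List.sum_cons, List.map_append, List.sum_append, List.map_map,
      Function.comp_def, List.unattach_filter, List.unattach_attach]
    rw [pvMapAttach rem (fun a => ((rem.filter (fun y => y != a)).length + 1).factorial)]
    omega

def function_alt (s : List Int) : List (List Int) :=
  functionAltLoop [] [([], s)]

-- ===== PRECONDITION & SPEC =====
def Spec_function (s : List Int) (out : List (List Int)) : Prop := out = function_alt s
instance (s : List Int) (out : List (List Int)) : Decidable (Spec_function s out) := by unfold Spec_function; infer_instance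

-- ===== CLAIM (what is proved, stated in full; the proofs are below) =====
def Claim_equal_function : Prop := ∀ (s : List Int), Dom_function s → Spec_function s (function s)

-- ===== LEMMAS AND PROOFS =====

theorem function_one {s : List Int} (h : s.length = 1) : function s = [s] := by
  rw [function, if_pos h]

theorem function_ne_one {s : List Int} (h : ¬ s.length = 1) :
    function s = s.flatMap
      (fun a => (function (s.filter (fun x => x != a))).map (fun t => a :: t)) := by
  rw [function, if_neg h]
  have hinner : ∀ (pl : List (List Int)) (a : Int),
      (function (s.filter (fun x => x != a))).foldl (fun pl t => pl ++ [a :: t]) pl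
        = pl ++ (function (s.filter (fun x => x != a))).map (fun t => a :: t) := by
    intro pl a
    exact PySem.List.foldl_append_singleton_eq_map _ _ _
  calc s.attach.foldl
        (fun perm_list a =>
          (function (s.filter (fun x => x != a.1))).foldl
            (fun pl t => pl ++ [a.1 :: t]) perm_list) []
      = s.attach.foldl
          (fun perm_list a =>
            perm_list ++ (function (s.filter (fun x => x != a.1))).map (fun t => a.1 :: t))
          [] := by
        apply PySem.List.foldl_congr_mem
        intro acc x hx
        exact hinner acc x.1
    _ = [] ++ s.attach.flatMap
          (fun a => (function (s.filter (fun x => x != a.1))).map (fun t => a.1 :: t)) :=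
        PySem.List.foldl_append_eq_flatMap _ _ _
    _ = s.flatMap
          (fun a => (function (s.filter (fun x => x != a))).map (fun t => a :: t)) := by
        simp [List.flatMap_def]

theorem functionAltLoop_eq (out : List (List Int)) (stack : List (List Int × List Int)) :
    functionAltLoop out stack
      = out ++ (stack.map (fun e => (function e.2).map (fun t => e.1 ++ t))).flatten := by
  fun_induction functionAltLoop out stack with
  | case1 out => simp
  | case2 out pre rem rest h ih =>
    rw [ih]
    simp [function_one h]
  | case3 out pre rem rest h ih =>
    simp only [List.unattach_filter, List.unattach_attach] at ih
    rw [pvMapAttach rem (fun a => (pre ++ [a], rem.filter (fun x => x != a)))] at ih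
    rw [ih]
    conv_rhs => rw [List.map_cons, List.flatten_cons, function_ne_one h]
    simp [List.flatMap_def, List.map_map, Function.comp_def, List.append_assoc]

theorem function_spec : Claim_equal_function := by
  intro s _
  unfold Spec_function function_alt
  rw [functionAltLoop_eq]
  simp
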